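-- pv_equiv track=rewrite | github.com/magv/wq | wq.py | itos
-- ===== SOURCE A (Python) =====
-- def itos(n:int) -> str:
--     C = "bcdfghjklmnpqrstvwxyz"
--     V = "aeiou"
--     letters = []
--     rem = 0
--     while n > 0:
--         syl = rem + (n % 2205)*991
--         n //= 2205
--         rem = syl // 2205
--         letters.append(C[syl % 21]); syl //= 21
--         letters.append(V[syl %  5]); syl //=  5
--         letters.append(C[syl % 21])
--     return "".join(letters)
-- ===== SOURCE B (Python) =====
-- def itos(n: int) -> str:
--     # Carry-free re-implementation: the digit groups are the base-2205 digits
--     # of (991*n) mod 2205**k, where k is n's base-2205 digit count.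
--     C = "bcdfghjklmnpqrstvwxyz"
--     V = "aeiou"
--     if n <= 0:
--         return ""
--     k, t = 0, n
--     while t > 0:
--         k += 1
--         t //= 2205
--     m = (991 * n) % (2205 ** k)
--     out = []
--     for _ in range(k):
--         d = m % 2205
--         m //= 2205
--         out.append(C[d % 21] + V[d // 21 % 5] + C[d // 105])
--     return "".join(out)
-- ===== Notes on version B (the rewrite author's own statement) =====
-- stated objective: alternative
-- what changed: B replaces A's carry-threading digit-by-digit 991-multiplication with a single modular product m = (991*n) mod 2205**k (k = base-2205 digit count), then emits the k digit groups of m with no carry state.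
import Mathlib
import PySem

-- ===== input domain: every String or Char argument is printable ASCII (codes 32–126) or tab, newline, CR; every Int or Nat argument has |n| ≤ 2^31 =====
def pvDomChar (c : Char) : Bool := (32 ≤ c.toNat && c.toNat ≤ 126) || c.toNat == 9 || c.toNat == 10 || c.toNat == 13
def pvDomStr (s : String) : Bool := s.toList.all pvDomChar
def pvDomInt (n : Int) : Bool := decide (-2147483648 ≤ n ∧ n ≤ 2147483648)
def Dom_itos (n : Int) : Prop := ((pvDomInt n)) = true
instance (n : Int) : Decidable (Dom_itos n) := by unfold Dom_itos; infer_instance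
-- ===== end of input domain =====

-- B replaces A's carry-threading 991-multiplication loop with one modular product
-- m = (991*n) mod 2205^k (k = base-2205 digit count of n), then emits m's digit groups.

-- ===== PORT A =====
-- consonants "bcdfghjklmnpqrstvwxyz" and vowels "aeiou" as char lists (the indices below are always in range)
def itosC : List Char := ['b','c','d','f','g','h','j','k','l','m','n','p','q','r','s','t','v','w','x','y','z']
def itosV : List Char := ['a','e','i','o','u']

-- A's while-loop: state (n, rem); three letters appended per iteration, syl reassigned by //=
def itosLoopA (n rem : Int) : List Char :=
  if h : 0 < n then
    let syl := rem + (PySem.Int.mod n 2205) * 991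
    let rem' := PySem.Int.floordiv syl 2205
    let c1 := itosC.getD (PySem.Int.mod syl 21).toNat ' '
    let syl1 := PySem.Int.floordiv syl 21
    let v := itosV.getD (PySem.Int.mod syl1 5).toNat ' '
    let syl2 := PySem.Int.floordiv syl1 5
    let c2 := itosC.getD (PySem.Int.mod syl2 21).toNat ' '
    c1 :: v :: c2 :: itosLoopA (PySem.Int.floordiv n 2205) rem'
  else []
  termination_by n.toNat
  decreasing_by
    have h2 : PySem.Int.floordiv n 2205 < n :=
      (PySem.Int.floordiv_lt_iff_lt_mul (by omega)).mpr (by nlinarith)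
    omega

def itos (n : Int) : String := String.ofList (itosLoopA n 0)

-- ===== PORT B =====
-- B's first loop: count base-2205 digits of n (the running k of Source B, kept as a Nat)
def itosDigits (n : Int) : Nat :=
  if h : 0 < n then itosDigits (PySem.Int.floordiv n 2205) + 1 else 0
  termination_by n.toNat
  decreasing_by
    have h2 : PySem.Int.floordiv n 2205 < n :=
      (PySem.Int.floordiv_lt_iff_lt_mul (by omega)).mpr (by nlinarith)
    omega

-- B's second loop: k iterations peeling one base-2205 digit d of m, three letters each
def itosLoopB (k : Nat) (m : Int) : List Char :=
  match k with
  | 0 => []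
  | k + 1 =>
    let d := PySem.Int.mod m 2205
    itosC.getD (PySem.Int.mod d 21).toNat ' ' ::
    itosV.getD (PySem.Int.mod (PySem.Int.floordiv d 21) 5).toNat ' ' ::
    itosC.getD (PySem.Int.floordiv d 105).toNat ' ' ::
    itosLoopB k (PySem.Int.floordiv m 2205)

def itos_alt (n : Int) : String :=
  if 0 < n then
    String.ofList (itosLoopB (itosDigits n)
      (PySem.Int.mod (991 * n) ((2205 : Int) ^ itosDigits n)))
  else ""

-- ===== PRECONDITION & SPEC =====
def Spec_itos (n : Int) (out : String) : Prop := out = itos_alt n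
instance (n : Int) (out : String) : Decidable (Spec_itos n out) := by unfold Spec_itos; infer_instance

-- ===== CLAIM (what is proved, stated in full; the proofs are below) =====
def Claim_equal_itos : Prop := ∀ (n : Int), Dom_itos n → Spec_itos n (itos n)

-- ===== LEMMAS AND PROOFS =====

-- Loop invariant: A's loop on (n, rem) emits exactly B's k digit groups of (991*n + rem) mod 2205^k.
theorem itos_main (N : Nat) : ∀ (n rem : Int), n.toNat ≤ N → 0 ≤ rem →
    itosLoopA n rem =
      itosLoopB (itosDigits n) (PySem.Int.mod (991 * n + rem) ((2205 : Int) ^ itosDigits n)) := by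
  induction N with
  | zero =>
    intro n rem hN _
    have hn : ¬ 0 < n := by omega
    rw [itosLoopA, dif_neg hn, itosDigits, dif_neg hn]
    rfl
  | succ N ih =>
    intro n rem hN hrem
    by_cases hn : 0 < n
    · -- names for the pieces
      have h2205 : (0:Int) < 2205 := by norm_num
      have hfd : PySem.Int.floordiv n 2205 = n / 2205 := PySem.Int.floordiv_eq_ediv_of_pos h2205
      set n' := n / 2205 with hn'
      set k' := itosDigits n' with hk'
      have hk : itosDigits n = k' + 1 := by rw [itosDigits, dif_pos hn, hfd]
      have hmodn : PySem.Int.mod n 2205 = n % 2205 := PySem.Int.mod_eq_emod_of_pos h2205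
      set r := n % 2205 with hr
      set syl := rem + r * 991 with hsyl
      have hsylnn : 0 ≤ syl := by
        have := Int.emod_nonneg n (by norm_num : (2205:Int) ≠ 0); simp [hsyl, hr]; positivity
      set q := syl / 2205 with hq
      set d := syl % 2205 with hd
      have hdb : 0 ≤ d ∧ d < 2205 := ⟨Int.emod_nonneg _ (by norm_num), Int.emod_lt_of_pos _ h2205⟩
      have hqnn : 0 ≤ q := Int.ediv_nonneg hsylnn (by norm_num)
      have hsyl_split : syl = 2205 * q + d := by rw [hq, hd]; omega
      set Y := 991 * n' + q with hY
      set P := (2205:Int) ^ k' with hP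
      have hPpos : (0:Int) < P := pow_pos h2205 _
      have hX : 991 * n + rem = 2205 * Y + d := by
        have h1 : n = 2205 * n' + r := by rw [hn', hr]; omega
        rw [hY]; rw [hsyl_split] at hsyl; linarith [hsyl]
      have hYb : 0 ≤ Y % P ∧ Y % P < P :=
        ⟨Int.emod_nonneg _ (ne_of_gt hPpos), Int.emod_lt_of_pos _ hPpos⟩
      have hm : (991 * n + rem) % (2205 * P) = 2205 * (Y % P) + d := by
        have hsplit : 991 * n + rem = (2205 * P) * (Y / P) + (2205 * (Y % P) + d) := by
          rw [hX]; have hsp := Int.emod_add_mul_ediv Y P; nlinarith [hsp]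
        rw [hsplit, add_comm, Int.add_mul_emod_self_left]
        exact Int.emod_eq_of_lt (by nlinarith [hdb.1, hYb.1]) (by nlinarith [hdb.2, hYb.2])
      have hpow : (2205:Int) ^ (k' + 1) = 2205 * P := by rw [hP, pow_succ]; ring
      -- unfold one step of each loop
      rw [itosLoopA, dif_pos hn, hk, itosLoopB]
      simp only [hmodn, hfd]
      have hmod2205 : ∀ a : Int, PySem.Int.mod a 2205 = a % 2205 :=
        fun a => PySem.Int.mod_eq_emod_of_pos h2205
      have hmodP : PySem.Int.mod (991 * n + rem) ((2205:Int) ^ (k' + 1)) = 2205 * (Y % P) + d := by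
        rw [PySem.Int.mod_eq_emod_of_pos (by rw [hpow]; positivity), hpow, hm]
      rw [hmodP]
      have hmod21 : ∀ a : Int, PySem.Int.mod a 21 = a % 21 :=
        fun a => PySem.Int.mod_eq_emod_of_pos (by norm_num)
      have hmod5 : ∀ a : Int, PySem.Int.mod a 5 = a % 5 :=
        fun a => PySem.Int.mod_eq_emod_of_pos (by norm_num)
      have hfd21 : ∀ a : Int, PySem.Int.floordiv a 21 = a / 21 :=
        fun a => PySem.Int.floordiv_eq_ediv_of_pos (by norm_num)
      have hfd5 : ∀ a : Int, PySem.Int.floordiv a 5 = a / 5 :=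
        fun a => PySem.Int.floordiv_eq_ediv_of_pos (by norm_num)
      have hfd105 : ∀ a : Int, PySem.Int.floordiv a 105 = a / 105 :=
        fun a => PySem.Int.floordiv_eq_ediv_of_pos (by norm_num)
      have hfd2205 : ∀ a : Int, PySem.Int.floordiv a 2205 = a / 2205 :=
        fun a => PySem.Int.floordiv_eq_ediv_of_pos h2205
      simp only [hmod2205, hmod21, hmod5, hfd21, hfd5, hfd105, hfd2205]
      have hd0 : (2205 * (Y % P) + d) % 2205 = d := by omega
      have hdiv0 : (2205 * (Y % P) + d) / 2205 = Y % P := by omega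
      rw [hd0, hdiv0]
      congr 1
      · -- first consonant
        congr 2
        omega
      congr 1
      · -- vowel
        congr 2
        omega
      congr 1
      · -- second consonant
        congr 2
        omega
      · -- recursive call
        have hrec : itosLoopA n' q = itosLoopB k' (Y % P) := by
          rw [ih n' q (by omega) hqnn, ← hk', PySem.Int.mod_eq_emod_of_pos hPpos]
        exact hrec
    · have hd0 : itosDigits n = 0 := by rw [itosDigits, dif_neg hn]
      rw [itosLoopA, dif_neg hn, hd0]
      rfl

-- ===== VERDICT (by name: the statement is the Claim_ definition above) =====
theorem itos_spec : Claim_equal_itos := by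
  intro n _
  unfold Spec_itos itos itos_alt
  by_cases h : 0 < n
  · rw [if_pos h, itos_main n.toNat n 0 le_rfl le_rfl]
    norm_num
  · rw [if_neg h, itos_main n.toNat n 0 le_rfl le_rfl, itosDigits, dif_neg h]
    rfl
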